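-- pv_equiv track=rewrite | github.com/pypi-data/pypi-mirror-364 | packages/net2cog/net2cog-1.0.0.tar.gz/net2cog-1.0.0/net2cog/utilities.py | construct_absolute_path
-- ===== SOURCE A (Python) =====
-- def construct_absolute_path(group_path: str, reference: str) -> str:
--     """For a relative reference to another variable (e.g. '../latitude'),
--     construct an absolute path by combining the reference with the
--     group path of the variable.
--
--     """
--     relative_prefix = "../"
--     group_path_pieces = group_path.split("/")
--
--     while reference.startswith(relative_prefix):
--         reference = reference[len(relative_prefix):]
--         group_path_pieces.pop()
--
--     absolute_path = group_path_pieces + [reference]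
--     return "/".join(absolute_path)
-- ===== SOURCE B (Python) =====
-- def construct_absolute_path(group_path: str, reference: str) -> str:
--     """Recurse on the reference: each leading '../' ascends to the parent
--     group via rpartition, never splitting the path into a list of pieces."""
--     if reference.startswith("../"):
--         parent, slash, _ = group_path.rpartition("/")
--         if slash:
--             return construct_absolute_path(parent, reference[3:])
--         return reference[3:]
--     return group_path + "/" + reference
-- ===== Notes on version B (the rewrite author's own statement) =====
-- stated objective: alternative
-- what changed: B never builds the list of path pieces: it recurses on the reference, ascending to the parent group with one rpartition per leading '../' and finishing with a single string concatenation, instead of A's split-into-list / pop-per-prefix / join pipeline; where A pops from an empty list (more '../' than path segments) A raises IndexError, which Pre_ excludes, and B just returns the remaining reference there.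
import Mathlib
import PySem

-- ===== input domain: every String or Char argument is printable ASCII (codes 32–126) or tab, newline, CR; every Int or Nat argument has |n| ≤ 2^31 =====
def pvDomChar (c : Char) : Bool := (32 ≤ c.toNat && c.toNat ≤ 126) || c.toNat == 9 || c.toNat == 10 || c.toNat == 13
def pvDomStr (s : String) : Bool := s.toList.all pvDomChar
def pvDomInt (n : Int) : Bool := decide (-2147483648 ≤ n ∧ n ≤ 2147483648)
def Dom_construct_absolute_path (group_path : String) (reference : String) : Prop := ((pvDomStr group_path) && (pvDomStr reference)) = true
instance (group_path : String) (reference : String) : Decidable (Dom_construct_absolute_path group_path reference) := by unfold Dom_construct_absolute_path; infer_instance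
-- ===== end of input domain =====

-- B never splits the group path into a list of pieces: it recurses on the reference, ascending
-- to the parent group with rpartition for each leading "../" and finishing with a single
-- concatenation (objective: alternative — different data representation, same cost).

-- ===== PORT A =====
-- A's while loop: as long as reference starts with "../" (i.e. is '.'::'.'::'/'::rest —
-- exact for the 3-char literal), strip it (reference[3:] = rest) and pop one piece.
-- Python's pop() on an empty list raises IndexError — those inputs are outside Pre_ below.
def pvPopLoop : List String → List Char → List String × List Char
  | pieces, '.' :: '.' :: '/' :: rest => pvPopLoop pieces.dropLast rest
  | pieces, ref => (pieces, ref)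

def construct_absolute_path (group_path : String) (reference : String) : String :=
  let group_path_pieces := (PySem.Str.split? group_path "/").getD []  -- sep "/" ≠ "": split? is never none
  match pvPopLoop group_path_pieces reference.toList with
  | (pieces, ref) => PySem.Str.join "/" (pieces ++ [String.ofList ref])

-- ===== PORT B =====
-- head of Python's group_path.rpartition("/"): some head = the characters before the LAST '/',
-- none = there is no '/' (Python's empty `slash`); hand-ported (PySem has no rpartition),
-- exact for the one-character separator "/" used here.
def pvRPart : List Char → Option (List Char)
  | [] => none
  | c :: rest =>
    match pvRPart rest with
    | some h => some (c :: h)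
    | none => if c = '/' then some [] else none

-- B's recursion on the reference (strings as char lists; Python `+` is list append here).
def pvAltCore : List Char → List Char → List Char
  | gp, '.' :: '.' :: '/' :: rest =>
    (match pvRPart gp with
     | some parent => pvAltCore parent rest
     | none => rest)
  | gp, ref => gp ++ '/' :: ref
termination_by gp ref => ref.length

def construct_absolute_path_alt (group_path : String) (reference : String) : String :=
  String.ofList (pvAltCore group_path.toList reference.toList)

-- ===== PRECONDITION & SPEC =====
-- Pre_ excludes exactly the inputs on which Python A raises IndexError (pop from an empty
-- list): a reference that begins with more "../" components than the group path has
-- segments (number of '/' characters + 1), i.e. one starting with count+2 copies of "../".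
def Pre_construct_absolute_path (group_path : String) (reference : String) : Prop :=
  ¬ (List.replicate (group_path.toList.count '/' + 2) ['.', '.', '/']).flatten <+: reference.toList
instance (group_path : String) (reference : String) : Decidable (Pre_construct_absolute_path group_path reference) := by unfold Pre_construct_absolute_path; infer_instance

def pvWitness_construct_absolute_path : String × String := ("a/b", "../c")

def Spec_construct_absolute_path (group_path : String) (reference : String) (out : String) : Prop := out = construct_absolute_path_alt group_path reference
instance (group_path : String) (reference : String) (out : String) : Decidable (Spec_construct_absolute_path group_path reference out) := by unfold Spec_construct_absolute_path; infer_instance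

-- ===== CLAIM (what is proved, stated in full; the proofs are below) =====
def Claim_equal_construct_absolute_path : Prop := ∀ (group_path : String) (reference : String), Dom_construct_absolute_path group_path reference → Pre_construct_absolute_path group_path reference → Spec_construct_absolute_path group_path reference (construct_absolute_path group_path reference)

-- ===== LEMMAS AND PROOFS =====

-- number of leading "../" components of a string (characterises both loops)
def pvUpCount : List Char → Nat
  | '.' :: '.' :: '/' :: rest => pvUpCount rest + 1
  | _ => 0

-- the residue the strip loop leaves of the reference
def pvUpRest : List Char → List Char
  | '.' :: '.' :: '/' :: rest => pvUpRest rest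
  | r => r

-- proof-side model of splitting on '/'
def pvSplit : List Char → List (List Char)
  | [] => [[]]
  | c :: rest =>
    if c = '/' then [] :: pvSplit rest
    else (c :: (pvSplit rest).headI) :: (pvSplit rest).tail

lemma pvSplit_ne_nil (cs : List Char) : pvSplit cs ≠ [] := by
  cases cs with
  | nil => simp [pvSplit]
  | cons c rest => by_cases h : c = '/' <;> simp [pvSplit, h]

lemma pvSplitOn_go_eq (fuel : Nat) (l cur : List Char) (acc : List (List Char))
    (h : l.length < fuel) :
    PySem.Chars.splitOn.go ['/'] fuel l cur acc
      = acc.reverse ++ (cur.reverse ++ (pvSplit l).headI) :: (pvSplit l).tail := by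
  induction fuel generalizing l cur acc with
  | zero => omega
  | succ n ih =>
    cases l with
    | nil => simp [PySem.Chars.splitOn.go, pvSplit]
    | cons c rest =>
      rw [PySem.Chars.splitOn.go]
      by_cases hc : c = '/'
      · subst hc
        have hpre : List.isPrefixOf ['/'] ('/' :: rest) = true := by simp [List.isPrefixOf]
        rw [if_pos hpre]
        simp only [List.length_cons, List.length_nil, List.drop_succ_cons, List.drop_zero]
        rw [ih rest [] ((List.reverse cur) :: acc) (by simp at h; omega)]
        obtain ⟨a, as, hs⟩ : ∃ a as, pvSplit rest = a :: as := by
          cases hx : pvSplit rest with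
          | nil => exact absurd hx (pvSplit_ne_nil rest)
          | cons a as => exact ⟨a, as, rfl⟩
        simp [pvSplit, hs]
      · have hpre : List.isPrefixOf ['/'] (c :: rest) = false := by
          simp only [List.isPrefixOf, Bool.and_eq_false_iff, beq_eq_false_iff_ne, ne_eq]
          exact Or.inl fun he => hc he.symm
        rw [if_neg (by simp [hpre])]
        rw [ih rest (c :: cur) acc (by simp at h; omega)]
        obtain ⟨a, as, hs⟩ : ∃ a as, pvSplit rest = a :: as := by
          cases hx : pvSplit rest with
          | nil => exact absurd hx (pvSplit_ne_nil rest)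
          | cons a as => exact ⟨a, as, rfl⟩
        simp [pvSplit, hc, hs]

lemma pvSplitOn_eq (cs : List Char) : PySem.Chars.splitOn cs ['/'] = pvSplit cs := by
  rw [PySem.Chars.splitOn, pvSplitOn_go_eq cs.length.succ cs [] [] (Nat.lt_succ_self _)]
  cases hx : pvSplit cs with
  | nil => exact absurd hx (pvSplit_ne_nil cs)
  | cons a as => simp

lemma pvPopLoop_eq (pieces : List String) (ref : List Char) :
    pvPopLoop pieces ref = (pieces.take (pieces.length - pvUpCount ref), pvUpRest ref) := by
  induction pieces, ref using pvPopLoop.induct with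
  | case1 pieces rest ih =>
    rw [pvPopLoop, ih]
    simp only [pvUpCount, pvUpRest, List.dropLast_eq_take, List.take_take, List.length_take]
    congr 2
    omega
  | case2 pieces ref h =>
    have hc : pvUpCount ref = 0 := by
      unfold pvUpCount; split
      · exact (h _ rfl).elim
      · rfl
    have hr : pvUpRest ref = ref := by
      unfold pvUpRest; split
      · exact (h _ rfl).elim
      · rfl
    unfold pvPopLoop; split
    · exact (h _ rfl).elim
    · rw [hc, hr]; simp

lemma pvRPart_none {cs : List Char} (h : pvRPart cs = none) : pvSplit cs = [cs] := by
  induction cs with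
  | nil => rfl
  | cons c rest ih =>
    rw [pvRPart] at h
    cases hr : pvRPart rest with
    | some p => rw [hr] at h; simp at h
    | none =>
      rw [hr] at h
      by_cases hc : c = '/'
      · rw [if_pos hc] at h; simp at h
      · rw [if_neg hc] at h
        simp [pvSplit, hc, ih hr]

lemma pvRPart_some {cs p : List Char} (h : pvRPart cs = some p) :
    ∃ t, pvSplit cs = pvSplit p ++ [t] := by
  induction cs generalizing p with
  | nil => simp [pvRPart] at h
  | cons c rest ih =>
    rw [pvRPart] at h
    cases hr : pvRPart rest with
    | none =>
      rw [hr] at h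
      by_cases hc : c = '/'
      · rw [if_pos hc] at h
        obtain rfl : p = [] := by simpa using h.symm
        subst hc
        exact ⟨rest, by simp [pvSplit, pvRPart_none hr]⟩
      · rw [if_neg hc] at h; simp at h
    | some q =>
      rw [hr] at h
      obtain rfl : p = c :: q := by simpa using h.symm
      obtain ⟨t, ht⟩ := ih hr
      obtain ⟨a, as, hs⟩ : ∃ a as, pvSplit q = a :: as := by
        cases hx : pvSplit q with
        | nil => exact absurd hx (pvSplit_ne_nil q)
        | cons a as => exact ⟨a, as, rfl⟩
      by_cases hc : c = '/'
      · exact ⟨t, by simp [pvSplit, hc, ht]⟩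
      · refine ⟨t, ?_⟩
        simp [pvSplit, hc, ht, hs]

lemma pvJoin_single (x : List Char) : PySem.Chars.join ['/'] [x] = x := by
  simp [PySem.Chars.join, List.intercalate]

lemma pvJoin_cons2 (x y : List Char) (zs : List (List Char)) :
    PySem.Chars.join ['/'] (x :: y :: zs) = x ++ '/' :: PySem.Chars.join ['/'] (y :: zs) := by
  simp [PySem.Chars.join, List.intercalate, List.intersperse]

lemma pvJoin_pvSplit (cs : List Char) : PySem.Chars.join ['/'] (pvSplit cs) = cs := by
  induction cs with
  | nil => simp [pvSplit]
  | cons c rest ih =>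
    obtain ⟨a, as, hs⟩ : ∃ a as, pvSplit rest = a :: as := by
      cases hx : pvSplit rest with
      | nil => exact absurd hx (pvSplit_ne_nil rest)
      | cons a as => exact ⟨a, as, rfl⟩
    by_cases hc : c = '/'
    · subst hc
      have h1 : pvSplit ('/' :: rest) = [] :: pvSplit rest := by rw [pvSplit]; simp
      rw [hs] at ih
      rw [h1, hs, pvJoin_cons2]
      simp [ih]
    · rw [pvSplit]; simp only [if_neg hc]
      rw [hs] at ih ⊢
      cases as with
      | nil => simp only [List.headI, List.tail]; rw [pvJoin_single] at ih ⊢; simp [ih]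
      | cons b bs =>
        simp only [List.headI, List.tail]
        rw [pvJoin_cons2] at ih ⊢
        simp [ih]

lemma pvJoin_append_singleton (xs : List (List Char)) (r : List Char) (h : xs ≠ []) :
    PySem.Chars.join ['/'] (xs ++ [r]) = PySem.Chars.join ['/'] xs ++ '/' :: r := by
  induction xs with
  | nil => simp at h
  | cons x ys ih =>
    cases ys with
    | nil => rw [pvJoin_single]; simpa using pvJoin_cons2 x r []
    | cons y zs =>
      rw [List.cons_append, List.cons_append, pvJoin_cons2 x y (zs ++ [r]),
        ← List.cons_append, ih (by simp), pvJoin_cons2]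
      simp

lemma pvSplit_length (cs : List Char) : (pvSplit cs).length = cs.count '/' + 1 := by
  induction cs with
  | nil => rfl
  | cons c rest ih =>
    obtain ⟨a, as, hs⟩ : ∃ a as, pvSplit rest = a :: as := by
      cases hx : pvSplit rest with
      | nil => exact absurd hx (pvSplit_ne_nil rest)
      | cons a as => exact ⟨a, as, rfl⟩
    by_cases hc : c = '/'
    · subst hc; simp [pvSplit, ih]
    · simp [pvSplit, hc, hs] at ih ⊢
      omega

lemma pvPrefix_iff (k : Nat) (ref : List Char) :
    (List.replicate k ['.', '.', '/']).flatten <+: ref ↔ k ≤ pvUpCount ref := by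
  induction ref using pvUpCount.induct generalizing k with
  | case1 rest ih =>
    cases k with
    | zero => simp
    | succ n =>
      rw [List.replicate_succ, List.flatten_cons, pvUpCount]
      constructor
      · rintro ⟨t, ht⟩
        simp only [List.cons_append, List.cons.injEq] at ht
        have := (ih n).mp ⟨t, ht.2.2.2⟩
        omega
      · intro hle
        obtain ⟨t, ht⟩ := (ih n).mpr (by omega)
        exact ⟨t, by simp [← ht]⟩
  | case2 ref h =>
    have hz : pvUpCount ref = 0 := by
      unfold pvUpCount; split
      · exact (h _ rfl).elim
      · rfl
    rw [hz]
    cases k with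
    | zero => simp
    | succ n =>
      simp only [Nat.succ_ne_zero, Nat.le_zero, iff_false]
      rintro ⟨t, ht⟩
      rw [List.replicate_succ, List.flatten_cons] at ht
      exact h (List.flatten (List.replicate n ['.', '.', '/']) ++ t) (by rw [← ht]; simp)

lemma pvUpRest_eq_self {r : List Char} (h : pvUpCount r = 0) : pvUpRest r = r := by
  unfold pvUpRest; split
  · rw [pvUpCount] at h; omega
  · rfl

lemma pvCore_eq (gp ref : List Char) (h : pvUpCount ref ≤ (pvSplit gp).length) :
    PySem.Chars.join ['/']
        ((pvSplit gp).take ((pvSplit gp).length - pvUpCount ref) ++ [pvUpRest ref])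
      = pvAltCore gp ref := by
  induction gp, ref using pvAltCore.induct with
  | case1 gp rest parent hrp ih =>
    obtain ⟨t, ht⟩ := pvRPart_some hrp
    rw [pvAltCore, hrp]
    simp only [pvUpCount, pvUpRest] at h ⊢
    rw [ht] at h ⊢
    simp only [List.length_append, List.length_cons, List.length_nil] at h ⊢
    rw [List.take_append_of_le_length (by omega)]
    have := ih (by omega)
    rw [show (pvSplit parent).length + 1 - (pvUpCount rest + 1)
        = (pvSplit parent).length - pvUpCount rest by omega]
    exact this
  | case2 gp rest hrp =>
    rw [pvAltCore, hrp]
    rw [pvRPart_none hrp] at h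
    simp only [pvUpCount, pvUpRest, List.length_cons, List.length_nil] at h ⊢
    have hz : pvUpCount rest = 0 := by omega
    rw [pvUpRest_eq_self hz, hz, pvRPart_none hrp]
    simp
  | case3 gp ref h2 =>
    have hz : pvUpCount ref = 0 := by
      unfold pvUpCount; split
      · exact (h2 _ rfl).elim
      · rfl
    rw [pvAltCore.eq_def]
    split
    · exact (h2 _ rfl).elim
    · rw [hz, pvUpRest_eq_self hz, Nat.sub_zero, List.take_length,
        pvJoin_append_singleton _ _ (pvSplit_ne_nil gp), pvJoin_pvSplit]

-- ===== VERDICT (by name: the statement is the Claim_ definition above) =====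
theorem construct_absolute_path_spec : Claim_equal_construct_absolute_path := by
  intro group_path reference _ hpre
  unfold Pre_construct_absolute_path at hpre
  unfold Spec_construct_absolute_path
  have hsep : ("/" : String).toList = ['/'] := by decide
  have hsplit : PySem.Str.split? group_path "/"
      = some ((pvSplit group_path.toList).map String.ofList) := by
    rw [PySem.Str.split?, hsep, PySem.Chars.split?]
    simp [pvSplitOn_eq]
  have hcount : pvUpCount reference.toList ≤ (pvSplit group_path.toList).length := by
    rw [pvPrefix_iff] at hpre
    rw [pvSplit_length]
    omega
  unfold construct_absolute_path construct_absolute_path_alt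
  rw [hsplit]
  simp only [Option.getD_some, pvPopLoop_eq]
  rw [PySem.Str.join, hsep]
  rw [← pvCore_eq _ _ hcount]
  congr 2
  rw [← List.map_take, List.length_map]
  simp [List.map_map, Function.comp_def]
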